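-- pv_equiv track=rewrite | github.com/moleculadesigner/python_course | python_tasks/cycles.py | burst
-- ===== SOURCE A (Python) =====
-- def burst(base, step, length):
--     """
--     Prints geometric progression and its sum
--     """
--
--     if length < 2:
--         return "Error: invalid length."
--
--     burst_sum = base
--     out_seq_str = "Geometric burst: " + str(base) + ", "
--     while length > 1:
--         base *= step
--         burst_sum += base
--         out_seq_str += str(base)
--         if length > 2:
--             out_seq_str += ", "
--         length -= 1
--
--     out_seq_str += ("\n            Sum: " + str(burst_sum))
--     return out_seq_str
-- ===== SOURCE B (Python) =====
-- def burst(base, step, length):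
--     """
--     Prints geometric progression and its sum
--     """
--     if length < 2:
--         return "Error: invalid length."
--     terms = [base]
--     for _ in range(length - 1):
--         base *= step
--         terms.append(base)
--     return ("Geometric burst: " + ", ".join(str(t) for t in terms)
--             + "\n            Sum: " + str(sum(terms)))
-- ===== Notes on version B (the rewrite author's own statement) =====
-- stated objective: simpler
-- what changed: B first builds the list of terms with one accumulator loop, then formats the whole output in one shot with ', '.join and sum(), dropping A's interleaved string building and conditional-separator branch.
import Mathlib
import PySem

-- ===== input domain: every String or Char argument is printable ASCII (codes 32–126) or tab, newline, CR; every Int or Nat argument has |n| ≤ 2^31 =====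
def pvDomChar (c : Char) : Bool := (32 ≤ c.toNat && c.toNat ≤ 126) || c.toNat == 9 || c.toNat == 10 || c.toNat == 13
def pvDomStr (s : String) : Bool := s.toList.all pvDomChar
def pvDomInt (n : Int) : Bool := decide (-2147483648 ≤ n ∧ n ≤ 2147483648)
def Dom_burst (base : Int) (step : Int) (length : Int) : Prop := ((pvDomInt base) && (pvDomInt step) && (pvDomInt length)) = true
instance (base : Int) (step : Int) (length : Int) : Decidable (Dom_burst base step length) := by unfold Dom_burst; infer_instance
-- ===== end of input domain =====

-- B builds the list of terms first, then formats the whole output once with join/sum (simpler decomposition); same return value as A.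

-- ===== PORT A =====
-- A's while loop: state (base, burst_sum, out_seq_str); returns final (burst_sum, out_seq_str).
def burstLoopA (step : Int) (base sum : Int) (out : String) (length : Int) : Int × String :=
  if length > 1 then
    let b := base * step
    burstLoopA step b (sum + b)
      ((out ++ PySem.Int.toStr b) ++ (if length > 2 then ", " else "")) (length - 1)
  else (sum, out)
termination_by length.toNat
decreasing_by omega

def burst (base : Int) (step : Int) (length : Int) : String :=
  if length < 2 then "Error: invalid length."
  else
    let r := burstLoopA step base base ("Geometric burst: " ++ PySem.Int.toStr base ++ ", ") length
    r.2 ++ ("\n            Sum: " ++ PySem.Int.toStr r.1)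

-- ===== PORT B =====
-- Python's s.join(parts): first part, then s ++ part for each remaining part (exact semantics).
def pyJoin (s : String) : List String → String
  | [] => ""
  | x :: xs => xs.foldl (fun a y => (a ++ s) ++ y) x

def burst_alt (base : Int) (step : Int) (length : Int) : String :=
  if length < 2 then "Error: invalid length."
  else
    let st := (PySem.List.pyRange 0 (length - 1) 1).foldl
      (fun (st : Int × List Int) _ => (st.1 * step, st.2 ++ [st.1 * step])) (base, [base])
    "Geometric burst: " ++ pyJoin ", " (st.2.map PySem.Int.toStr)
      ++ ("\n            Sum: " ++ PySem.Int.toStr (st.2.foldl (· + ·) 0))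

-- ===== PRECONDITION & SPEC =====
def Spec_burst (base : Int) (step : Int) (length : Int) (out : String) : Prop := out = burst_alt base step length
instance (base : Int) (step : Int) (length : Int) (out : String) : Decidable (Spec_burst base step length out) := by unfold Spec_burst; infer_instance

-- ===== CLAIM (what is proved, stated in full; the proofs are below) =====
def Claim_equal_burst : Prop := ∀ (base : Int) (step : Int) (length : Int), Dom_burst base step length → Spec_burst base step length (burst base step length)

-- ===== LEMMAS AND PROOFS =====

-- the n terms that follow b in the geometric sequence
def gseq (step : Int) : Int → Nat → List Int
  | _, 0 => []
  | b, n + 1 => b * step :: gseq step (b * step) n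

theorem gseq_succ (step b : Int) (n : Nat) :
    gseq step b (n + 1) = b * step :: gseq step (b * step) n := rfl

theorem pyJoin_foldl_shift (s p q : String) (l : List String) :
    l.foldl (fun a y => (a ++ s) ++ y) (p ++ q) = p ++ l.foldl (fun a y => (a ++ s) ++ y) q := by
  induction l generalizing q with
  | nil => rfl
  | cons x l ih =>
    simp only [List.foldl_cons]
    rw [show ((p ++ q) ++ s) ++ x = p ++ ((q ++ s) ++ x) from by simp [String.append_assoc]]
    exact ih _

theorem pyJoin_cons_cons (s a b : String) (l : List String) :
    pyJoin s (a :: b :: l) = (a ++ s) ++ pyJoin s (b :: l) := by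
  simp only [pyJoin, List.foldl_cons]
  rw [← pyJoin_foldl_shift]

-- B's fold over any list only depends on its length
theorem foldB (step : Int) (l : List Int) (b : Int) (acc : List Int) :
    l.foldl (fun (st : Int × List Int) _ => (st.1 * step, st.2 ++ [st.1 * step])) (b, acc)
      = ((l.foldl (fun x _ => x * step) b), acc ++ gseq step b l.length) := by
  induction l generalizing b acc with
  | nil => simp [gseq]
  | cons x l ih => simp [ih, gseq_succ]

theorem foldl_add_shift (l : List Int) (a b : Int) :
    l.foldl (· + ·) (a + b) = a + l.foldl (· + ·) b := by
  induction l generalizing b with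
  | nil => rfl
  | cons x l ih => simp only [List.foldl_cons, Int.add_assoc, ih]

theorem foldl_add_eq (l : List Int) (a : Int) :
    l.foldl (· + ·) a = a + l.foldl (· + ·) 0 := by
  have h := foldl_add_shift l a 0
  simpa using h

-- A's loop, characterised for length = n + 2
theorem loopA (step : Int) (n : Nat) : ∀ (b s : Int) (o : String),
    burstLoopA step b s o ((n : Int) + 2)
      = (s + (gseq step b (n + 1)).foldl (· + ·) 0,
         o ++ pyJoin ", " ((gseq step b (n + 1)).map PySem.Int.toStr)) := by
  induction n with
  | zero =>
    intro b s o
    rw [burstLoopA]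
    simp [burstLoopA, gseq, pyJoin]
  | succ n ih =>
    intro b s o
    rw [burstLoopA]
    push_cast
    have h1 : ((n : Int) + 1 + 2) - 1 = (n : Int) + 2 := by ring
    have h2 : (1 : Int) < (n : Int) + 1 + 2 := by omega
    have h3 : (2 : Int) < (n : Int) + 1 + 2 := by omega
    rw [if_pos h2, if_pos h3]
    show burstLoopA step (b * step) (s + b * step)
        ((o ++ PySem.Int.toStr (b * step)) ++ ", ") ((n : Int) + 1 + 2 - 1) = _
    rw [h1, ih]
    rw [gseq_succ, gseq_succ, gseq_succ]
    simp only [List.map_cons, pyJoin_cons_cons, List.foldl_cons, String.append_assoc]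
    have he : s + b * step + List.foldl (· + ·) (0 + b * step * step) (gseq step (b * step * step) n)
        = s + List.foldl (· + ·) (0 + b * step + b * step * step) (gseq step (b * step * step) n) := by
      rw [foldl_add_eq (gseq step (b * step * step) n) (0 + b * step * step),
          foldl_add_eq (gseq step (b * step * step) n) (0 + b * step + b * step * step)]
      ring
    rw [he]

-- ===== VERDICT (by name: the statement is the Claim_ definition above) =====
theorem burst_spec : Claim_equal_burst := by
  intro base step length _
  unfold Spec_burst burst burst_alt
  by_cases h : length < 2
  · simp [h]
  · simp only [if_neg h]
    have hn : length = ((length - 2).toNat : Int) + 2 := by omega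
    set n := (length - 2).toNat with hndef
    have hr : (PySem.List.pyRange 0 (length - 1) 1).length = n + 1 := by
      rw [PySem.List.length_pyRange_one]; omega
    rw [foldB, hr]
    conv_lhs => rw [hn, loopA]
    rw [gseq_succ]
    simp only [List.singleton_append, List.map_cons, pyJoin_cons_cons, List.foldl_cons,
      String.append_assoc]
    have he : base + List.foldl (· + ·) (0 + base * step) (gseq step (base * step) n)
        = List.foldl (· + ·) (0 + base + base * step) (gseq step (base * step) n) := by
      rw [foldl_add_eq (gseq step (base * step) n) (0 + base * step),
          foldl_add_eq (gseq step (base * step) n) (0 + base + base * step)]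
      ring
    rw [he]
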